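-- pv_equiv track=rewrite | github.com/TwoEther/CodingTest | 동적계획법_문제정리/1579.py | solution
-- ===== SOURCE A (Python) =====
-- def solution(n):
--     dp = [[0]*10 for _ in range(n+1)]
--     for j in range(1, 10): dp[1][j] = 1
--
--     for i in range(2, n+1):
--         for j in range(1, 10):
--             s = max(j-2, 1)
--             e = min(j+2, 9)
--
--             for k in range(s, e+1):
--                 dp[i][j] += dp[i-1][k]
--             dp[i][j] %= 987654321
--
--     answer = 0
--     for j in range(1, 10): answer += dp[n][j]
--     return answer % 987654321
-- ===== SOURCE B (Python) =====
-- def solution(n):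
--     MOD = 987654321
--     def mul(A, B):
--         return [[sum(A[i][k] * B[k][j] for k in range(9)) % MOD for j in range(9)]
--                 for i in range(9)]
--     R = [[1 if i == j else 0 for j in range(9)] for i in range(9)]
--     T = [[1 if abs(i - j) <= 2 else 0 for j in range(9)] for i in range(9)]
--     e = n - 1
--     while e > 0:
--         if e & 1:
--             R = mul(R, T)
--         T = mul(T, T)
--         e >>= 1
--     return sum(sum(row) for row in R) % MOD
-- ===== Notes on version B (the rewrite author's own statement) =====
-- stated objective: faster
-- what changed: Replaces the O(n) row-by-row DP table with binary exponentiation of the 9x9 band transition matrix modulo 987654321, summing the entries of T^(n-1).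
import Mathlib
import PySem

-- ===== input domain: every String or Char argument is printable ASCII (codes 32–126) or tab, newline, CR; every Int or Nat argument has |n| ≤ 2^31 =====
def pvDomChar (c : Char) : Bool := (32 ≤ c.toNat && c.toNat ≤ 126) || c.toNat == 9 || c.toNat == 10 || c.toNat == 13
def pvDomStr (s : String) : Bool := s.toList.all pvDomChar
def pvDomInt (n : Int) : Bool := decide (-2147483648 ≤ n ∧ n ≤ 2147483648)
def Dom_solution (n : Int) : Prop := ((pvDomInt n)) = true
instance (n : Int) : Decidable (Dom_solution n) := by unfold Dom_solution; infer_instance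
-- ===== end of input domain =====

-- B replaces the O(n) row-by-row DP with binary exponentiation of the 9x9 band
-- transition matrix modulo 987654321 (O(log n) matrix multiplications).

def pvM : Int := 987654321

-- ===== PORT A =====
-- 2D-table access helpers; every index A uses is in range on Pre_, so getD/set
-- are exact for Python's dp[i][j] reads and writes.
def aGet (dp : List (List Int)) (i j : Nat) : Int := (dp.getD i []).getD j 0

def aSet (dp : List (List Int)) (i j : Nat) (v : Int) : List (List Int) :=
  dp.set i ((dp.getD i []).set j v)

-- literal transliteration of A: build the (n+1)×10 table, fill row 1, then the
-- i-loop (range(2, n+1)) with the j- and k-loops, then sum row n.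
def solution (n : Int) : Int :=
  let dp0 := List.replicate (n + 1).toNat (List.replicate 10 (0 : Int))
  let dp1 := (List.range' 1 9).foldl (fun dp j => aSet dp 1 j 1) dp0
  let dp2 := (List.range' 2 (n - 1).toNat).foldl (fun dp i =>
      (List.range' 1 9).foldl (fun dp j =>
        let s := max (j - 2) 1
        let e := min (j + 2) 9
        let dp := (List.range' s (e + 1 - s)).foldl
            (fun dp k => aSet dp i j (aGet dp i j + aGet dp (i - 1) k)) dp
        aSet dp i j (aGet dp i j % pvM)) dp) dp1
  let answer := (List.range' 1 9).foldl (fun a j => a + aGet dp2 n.toNat j) 0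
  answer % pvM

-- ===== PORT B =====
-- Source B's 9×9 matrices are Python lists of lists; they are ported as
-- List (List Int) with the same in-range getD access as port A's table.
def bMul (A B : List (List Int)) : List (List Int) :=
  (List.range 9).map (fun i => (List.range 9).map (fun j =>
    ((List.range 9).map (fun k => aGet A i k * aGet B k j)).sum % pvM))

def bId : List (List Int) :=
  (List.range 9).map (fun (i : Nat) => (List.range 9).map (fun (j : Nat) =>
    if i = j then (1 : Int) else 0))

def bT : List (List Int) :=
  (List.range 9).map (fun (i : Nat) => (List.range 9).map (fun (j : Nat) =>
    if |(i : Int) - (j : Int)| ≤ 2 then (1 : Int) else 0))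

-- the 'while e > 0' binary-exponentiation loop of Source B, as recursion on e
def bPow (R T : List (List Int)) (e : Nat) : List (List Int) :=
  if e = 0 then R
  else bPow (if e % 2 = 1 then bMul R T else R) (bMul T T) (e / 2)
  termination_by e
  decreasing_by exact Nat.div_lt_self (Nat.pos_of_ne_zero (by assumption)) (by norm_num)

def solution_alt (n : Int) : Int :=
  let P := bPow bId bT (n - 1).toNat
  (P.map (fun row => row.sum)).sum % pvM

-- ===== PRECONDITION & SPEC =====
-- Pre_: Python A indexes dp[1] into a table of n+1 rows, so it raises IndexError
-- for every n < 1; exactly those inputs are excluded.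
def Pre_solution (n : Int) : Prop := 1 ≤ n
instance (n : Int) : Decidable (Pre_solution n) := by unfold Pre_solution; infer_instance

def pvWitness_solution : Int := 3

def Spec_solution (n : Int) (out : Int) : Prop := out = solution_alt n
instance (n : Int) (out : Int) : Decidable (Spec_solution n out) := by unfold Spec_solution; infer_instance

-- ===== CLAIM (what is proved, stated in full; the proofs are below) =====
def Claim_equal_solution : Prop := ∀ (n : Int), Dom_solution n → Pre_solution n → Spec_solution n (solution n)

-- ===== LEMMAS AND PROOFS =====

-- the modulus as a natural number, and the cast glue
def MOD : ℕ := 987654321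

lemma castM (a : Int) : ((a % pvM : Int) : ZMod MOD) = (a : ZMod MOD) := by
  have : (pvM : Int) = ((MOD : ℕ) : Int) := by norm_num [pvM, MOD]
  rw [this]; exact_mod_cast ZMod.intCast_mod a MOD

lemma mod_eq_of_cast_eq {a b : Int} (h : (a : ZMod MOD) = b) : a % pvM = b % pvM := by
  have : (pvM : Int) = ((MOD : ℕ) : Int) := by norm_num [pvM, MOD]
  rw [this]; exact (ZMod.intCast_eq_intCast_iff' a b MOD).mp h

-- cast a 9×9 Int matrix (list of rows) to ZMod MOD
def φ (A : List (List Int)) : Matrix (Fin 9) (Fin 9) (ZMod MOD) :=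
  Matrix.of fun i j => ((aGet A (i : Nat) (j : Nat) : Int) : ZMod MOD)

lemma getD_mapRange {α : Type} (f : Nat → α) (d : α) {n i : Nat} (h : i < n) :
    ((List.range n).map f).getD i d = f i := by
  rw [List.getD_eq_getElem _ _ (by simpa using h), List.getElem_map, List.getElem_range]

lemma bMul_entry (A B : List (List Int)) (i j : Fin 9) :
    aGet (bMul A B) i j
      = ((List.range 9).map (fun k => aGet A i k * aGet B k j)).sum % pvM := by
  unfold bMul aGet
  rw [getD_mapRange _ _ i.isLt, getD_mapRange _ _ j.isLt]

lemma bT_entry (i j : Fin 9) :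
    aGet bT i j = if |((i : Nat) : Int) - ((j : Nat) : Int)| ≤ 2 then 1 else 0 := by
  unfold bT aGet
  rw [getD_mapRange _ _ i.isLt, getD_mapRange _ _ j.isLt]

lemma bId_entry (i j : Fin 9) :
    aGet bId i j = if (i : Nat) = (j : Nat) then 1 else 0 := by
  unfold bId aGet
  rw [getD_mapRange _ _ i.isLt, getD_mapRange _ _ j.isLt]

lemma cast_listSum (g : Nat → Int) (m : Nat) :
    ((((List.range m).map g).sum : Int) : ZMod MOD) = ∑ k : Fin m, ((g k : Int) : ZMod MOD) := by
  induction m with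
  | zero => simp
  | succ m ih =>
      rw [List.range_succ, List.map_append, List.sum_append, Int.cast_add, ih,
          Fin.sum_univ_castSucc]
      simp

lemma φ_mul (A B : List (List Int)) : φ (bMul A B) = φ A * φ B := by
  ext i j
  show ((aGet (bMul A B) i j : Int) : ZMod MOD) = _
  rw [bMul_entry, castM, cast_listSum, Matrix.mul_apply]
  refine Finset.sum_congr rfl (fun k _ => ?_)
  push_cast
  rfl

lemma φ_id : φ bId = 1 := by
  ext i j
  show ((aGet bId i j : Int) : ZMod MOD) = _
  rw [bId_entry]
  by_cases h : i = j
  · simp [h, Matrix.one_apply]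
  · have h' : ¬ ((i : Nat) = (j : Nat)) := fun hc => h (Fin.ext hc)
    simp [h', h]

lemma φ_bPow (R T : List (List Int)) (e : Nat) :
    φ (bPow R T e) = φ R * (φ T) ^ e := by
  induction e using Nat.strong_induction_on generalizing R T with
  | _ e ih =>
    rw [bPow]
    by_cases h : e = 0
    · rw [if_pos h, h]; simp
    · rw [if_neg h, ih (e / 2) (Nat.div_lt_self (Nat.pos_of_ne_zero h) (by norm_num))]
      by_cases hp : e % 2 = 1
      · rw [if_pos hp, φ_mul, φ_mul, mul_assoc]
        congr 1
        have hk : e = 2 * (e / 2) + 1 := by omega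
        conv_rhs => rw [hk, pow_succ', pow_mul, sq]
      · rw [if_neg hp, φ_mul]
        congr 1
        have hk : e = 2 * (e / 2) := by omega
        conv_rhs => rw [hk, pow_mul, sq]

-- shape of Source B's matrices: 9 rows of length 9
def MShape (P : List (List Int)) : Prop := P.length = 9 ∧ ∀ row ∈ P, row.length = 9

lemma shape_bMul (A B : List (List Int)) : MShape (bMul A B) := by
  refine ⟨by simp [bMul], ?_⟩
  intro row hrow
  simp only [bMul, List.mem_map] at hrow
  obtain ⟨i, _, rfl⟩ := hrow
  simp

lemma shape_bId : MShape bId := by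
  refine ⟨by simp [bId], ?_⟩
  intro row hrow
  simp only [bId, List.mem_map] at hrow
  obtain ⟨i, _, rfl⟩ := hrow
  simp

lemma shape_bPow (R T : List (List Int)) (hR : MShape R) (e : Nat) :
    MShape (bPow R T e) := by
  induction e using Nat.strong_induction_on generalizing R T with
  | _ e ih =>
    rw [bPow]
    by_cases h : e = 0
    · rw [if_pos h]; exact hR
    · rw [if_neg h]
      refine ih (e / 2) (Nat.div_lt_self (Nat.pos_of_ne_zero h) (by norm_num)) _ _ ?_
      by_cases hp : e % 2 = 1
      · rw [if_pos hp]; exact shape_bMul R T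
      · rw [if_neg hp]; exact hR

lemma list_eq_mapRange {α β : Type} (L : List α) (d : α) (f : α → β) :
    L.map f = (List.range L.length).map (fun i => f (L.getD i d)) := by
  refine List.ext_getElem (by simp) (fun i h1 h2 => ?_)
  have hi : i < L.length := by simpa using h1
  rw [List.getElem_map, List.getElem_map, List.getElem_range, List.getD_eq_getElem _ _ hi]

lemma alt_cast (P : List (List Int)) (hs : MShape P) :
    (((P.map (fun row => row.sum)).sum : Int) : ZMod MOD)
      = ∑ i : Fin 9, ∑ j : Fin 9, ((aGet P i j : Int) : ZMod MOD) := by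
  rw [list_eq_mapRange P [] (fun row => row.sum), hs.1, cast_listSum]
  refine Finset.sum_congr rfl (fun i _ => ?_)
  have hmem : P.getD (i : Nat) [] ∈ P := by
    rw [List.getD_eq_getElem _ _ (by rw [hs.1]; exact i.isLt)]
    exact List.getElem_mem _
  have hrow : (P.getD (i : Nat) []).length = 9 := hs.2 _ hmem
  have hid : P.getD (i : Nat) [] = (List.range 9).map (fun j => (P.getD (i : Nat) []).getD j 0) := by
    conv_lhs => rw [← List.map_id (P.getD (i : Nat) []), list_eq_mapRange _ 0 id, hrow]
    rfl
  conv_lhs => rw [hid]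
  rw [cast_listSum]
  rfl

-- ---- list set/get lemmas ----
lemma getD_set_self {α : Type} (l : List α) (i : Nat) (h : i < l.length) (a d : α) :
    (l.set i a).getD i d = a := by
  simp [List.getD, h]

lemma getD_set_ne {α : Type} (l : List α) {i k : Nat} (h : i ≠ k) (a d : α) :
    (l.set i a).getD k d = l.getD k d := by
  simp [List.getD, List.getElem?_set_ne h]

lemma aSet_length (dp : List (List Int)) (i j : Nat) (v : Int) :
    (aSet dp i j v).length = dp.length := by simp [aSet]

lemma aSet_row_length (dp : List (List Int)) (i j : Nat) (v : Int) (l : Nat) :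
    ((aSet dp i j v).getD l []).length = ((dp.getD l []).length) := by
  by_cases h : i = l
  · subst h
    by_cases hl : i < dp.length
    · rw [aSet, getD_set_self _ _ hl]; simp
    · rw [aSet, List.set_eq_of_length_le (by omega)]
  · rw [aSet, getD_set_ne _ h]

lemma aGet_aSet_self (dp : List (List Int)) {i j : Nat} (hi : i < dp.length)
    (hj : j < (dp.getD i []).length) (v : Int) :
    aGet (aSet dp i j v) i j = v := by
  rw [aGet, aSet, getD_set_self _ _ hi, getD_set_self _ _ hj]

lemma aGet_aSet_ne_row (dp : List (List Int)) {i i' : Nat} (h : i ≠ i') (j k : Nat) (v : Int) :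
    aGet (aSet dp i j v) i' k = aGet dp i' k := by
  rw [aGet, aSet, getD_set_ne _ h]; rfl

lemma aGet_aSet_ne_col (dp : List (List Int)) (i : Nat) {j k : Nat} (h : j ≠ k) (v : Int) :
    aGet (aSet dp i j v) i k = aGet dp i k := by
  by_cases hl : i < dp.length
  · rw [aGet, aSet, getD_set_self _ _ hl, getD_set_ne _ h]; rfl
  · rw [aGet, aSet, List.set_eq_of_length_le (by omega)]; rfl

lemma aSet_aSet (dp : List (List Int)) (i j : Nat) (v w : Int) :
    aSet (aSet dp i j v) i j w = aSet dp i j w := by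
  simp only [aSet]
  by_cases hl : i < dp.length
  · rw [getD_set_self _ _ hl, List.set_set, List.set_set]
  · have h1 : dp.length ≤ i := by omega
    simp [List.set_eq_of_length_le h1]

-- ---- the k-loop collapses to one write of the accumulated sum ----
lemma aSet_noop (dp : List (List Int)) {i j : Nat} (hi : i < dp.length)
    (hj : j < (dp.getD i []).length) : aSet dp i j (aGet dp i j) = dp := by
  have h1 : (dp.getD i []).set j ((dp.getD i []).getD j 0) = dp.getD i [] := by
    rw [List.getD_eq_getElem _ _ hj]; exact List.set_getElem_self hj
  simp only [aSet, aGet]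
  rw [h1, List.getD_eq_getElem _ _ hi]
  exact List.set_getElem_self hi

lemma kloop (ks : List Nat) (dp : List (List Int)) {i i' : Nat} (j : Nat)
    (hne : i' ≠ i) (hi : i < dp.length) (hj : j < (dp.getD i []).length) :
    ks.foldl (fun dp k => aSet dp i j (aGet dp i j + aGet dp i' k)) dp
      = aSet dp i j (aGet dp i j + (ks.map (fun k => aGet dp i' k)).sum) := by
  induction ks generalizing dp with
  | nil => simp [aSet_noop dp hi hj]
  | cons k ks ihk =>
      simp only [List.foldl_cons, List.map_cons, List.sum_cons]
      rw [ihk (aSet dp i j (aGet dp i j + aGet dp i' k))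
            (by rw [aSet_length]; exact hi)
            (by rw [aSet_row_length]; exact hj)]
      rw [aGet_aSet_self dp hi hj, aSet_aSet]
      have hm : List.map (fun k' => aGet (aSet dp i j (aGet dp i j + aGet dp i' k)) i' k') ks
          = List.map (fun k' => aGet dp i' k') ks :=
        List.map_congr_left (fun k' _ => aGet_aSet_ne_row dp (Ne.symm hne) j k' _)
      rw [hm, add_assoc]

def rowNext (r : List Int) : List Int :=
  0 :: (List.range' 1 9).map (fun j =>
    (((List.range' (max (j - 2) 1) (min (j + 2) 9 + 1 - max (j - 2) 1)).map
        (fun k => r.getD k 0)).sum) % pvM)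

def rowSpec : Nat → List Int
  | 0 => 0 :: List.replicate 9 1
  | t + 1 => rowNext (rowSpec t)

-- ---- the j-loop: fills row i of the table from row i-1 ----
def jbody (i : Nat) (dp : List (List Int)) (j : Nat) : List (List Int) :=
  let s := max (j - 2) 1
  let e := min (j + 2) 9
  let dp := (List.range' s (e + 1 - s)).foldl
      (fun dp k => aSet dp i j (aGet dp i j + aGet dp (i - 1) k)) dp
  aSet dp i j (aGet dp i j % pvM)

lemma jloop (js : List Nat) (dp : List (List Int)) (i : Nat)
    (hi1 : 1 ≤ i) (hi : i < dp.length) (hrow : ∀ l, l < dp.length → ((dp.getD l []).length) = 10)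
    (hjs : ∀ j ∈ js, j < 10) (hnd : js.Nodup)
    (hzero : ∀ j ∈ js, aGet dp i j = 0) :
    (∀ i'' k, i'' ≠ i → aGet (js.foldl (jbody i) dp) i'' k = aGet dp i'' k) ∧
    (∀ j, j ∉ js → aGet (js.foldl (jbody i) dp) i j = aGet dp i j) ∧
    (∀ j ∈ js, aGet (js.foldl (jbody i) dp) i j =
      ((List.range' (max (j - 2) 1) (min (j + 2) 9 + 1 - max (j - 2) 1)).map
        (fun k => aGet dp (i - 1) k)).sum % pvM) ∧
    (js.foldl (jbody i) dp).length = dp.length ∧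
    (∀ l, l < (js.foldl (jbody i) dp).length → (((js.foldl (jbody i) dp).getD l []).length) = 10) := by
  induction js generalizing dp with
  | nil => exact ⟨fun _ _ _ => rfl, fun _ _ => rfl, fun j hj => absurd hj (List.not_mem_nil), rfl, hrow⟩
  | cons j js ih =>
      have hj10 : j < 10 := hjs j List.mem_cons_self
      have hjlt : j < (dp.getD i []).length := by rw [hrow i hi]; exact hj10
      have hii : (i - 1) ≠ i := by omega
      have hnotin : j ∉ js := (List.nodup_cons.mp hnd).1
      have hdp1 : jbody i dp j = aSet dp i j
          (((List.range' (max (j - 2) 1) (min (j + 2) 9 + 1 - max (j - 2) 1)).map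
            (fun k => aGet dp (i - 1) k)).sum % pvM) := by
        simp only [jbody]
        rw [kloop _ dp j hii hi hjlt, aGet_aSet_self dp hi hjlt, aSet_aSet,
            hzero j List.mem_cons_self, zero_add]
      have hfold : (j :: js).foldl (jbody i) dp = js.foldl (jbody i) (jbody i dp j) := rfl
      set dp1 := jbody i dp j with hdp1def
      have hi' : i < dp1.length := by rw [hdp1, aSet_length]; exact hi
      have hrow' : ∀ l, l < dp1.length → ((dp1.getD l []).length) = 10 := by
        intro l hl; rw [hdp1, aSet_row_length]
        exact hrow l (by rw [hdp1, aSet_length] at hl; exact hl)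
      have hzero' : ∀ j' ∈ js, aGet dp1 i j' = 0 := by
        intro j' hj'
        rw [hdp1, aGet_aSet_ne_col dp i (fun h => hnotin (by rw [h]; exact hj'))]
        exact hzero j' (List.mem_cons_of_mem _ hj')
      obtain ⟨pa, pb, pc, pd, pe⟩ := ih dp1 hi' hrow'
        (fun j' hj' => hjs j' (List.mem_cons_of_mem _ hj')) (List.nodup_cons.mp hnd).2 hzero'
      rw [hfold]
      refine ⟨?_, ?_, ?_, ?_, pe⟩
      · intro i'' k hne
        rw [pa i'' k hne, hdp1, aGet_aSet_ne_row dp (Ne.symm hne)]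
      · intro j' hj'
        have hne : j ≠ j' := fun h => hj' (h ▸ List.mem_cons_self)
        rw [pb j' (fun h => hj' (List.mem_cons_of_mem _ h)), hdp1, aGet_aSet_ne_col dp i hne]
      · intro j' hj'
        rcases List.mem_cons.mp hj' with h | h
        · subst h
          rw [pb j' hnotin, hdp1, aGet_aSet_self dp hi hjlt]
        · rw [pc j' h]
          congr 2
          exact List.map_congr_left (fun k _ => by rw [hdp1, aGet_aSet_ne_row dp (by omega)])
      · rw [pd, hdp1, aSet_length]

-- ---- the i-loop invariant ----
lemma foldl_aSet_row (js : List Nat) (dp : List (List Int)) {i : Nat} (hi : i < dp.length) (v : Int) :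
    js.foldl (fun dp j => aSet dp i j v) dp
      = dp.set i (js.foldl (fun r j => r.set j v) (dp.getD i [])) := by
  induction js generalizing dp with
  | nil => rw [List.foldl_nil, List.foldl_nil, List.getD_eq_getElem _ _ hi, List.set_getElem_self]
  | cons j js ihj =>
      simp only [List.foldl_cons]
      rw [ihj (aSet dp i j v) (by rw [aSet_length]; exact hi)]
      simp only [aSet]
      rw [getD_set_self _ _ hi, List.set_set]

lemma getD_rep {α : Type} (m j : Nat) (a : α) : (List.replicate m a).getD j a = a := by
  rcases lt_or_ge j m with h | h
  · rw [List.getD_eq_getElem _ _ (by simp [h]), List.getElem_replicate]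
  · rw [List.getD_eq_default _ _ (by simp [h])]

def dpInit (n : Int) : List (List Int) :=
  (List.replicate (n + 1).toNat (List.replicate 10 (0 : Int))).set 1 (rowSpec 0)

lemma dp1_eq (n : Int) (hn : 1 ≤ n) :
    (List.range' 1 9).foldl (fun dp j => aSet dp 1 j 1)
      (List.replicate (n + 1).toNat (List.replicate 10 (0 : Int))) = dpInit n := by
  have hL : 1 < (List.replicate (n + 1).toNat (List.replicate 10 (0 : Int))).length := by
    simp; omega
  rw [foldl_aSet_row _ _ hL]
  unfold dpInit
  congr 1
  rw [List.getD_eq_getElem _ _ hL, List.getElem_replicate]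
  decide

lemma dpInit_length (n : Int) : (dpInit n).length = (n + 1).toNat := by simp [dpInit]

lemma dpInit_rowlen (n : Int) : ∀ l, l < (dpInit n).length → (((dpInit n).getD l []).length) = 10 := by
  intro l hl
  rw [dpInit_length] at hl
  by_cases h1 : l = 1
  · subst h1
    rw [dpInit, getD_set_self _ _ (by simpa using hl)]
    decide
  · rw [dpInit, getD_set_ne _ (fun h => h1 h.symm), List.getD_eq_getElem _ _ (by simpa using hl),
        List.getElem_replicate]
    simp

lemma dpInit_row1 (n : Int) (hn : 1 ≤ n) (j : Nat) :
    aGet (dpInit n) 1 j = (rowSpec 0).getD j 0 := by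
  rw [aGet, dpInit, getD_set_self _ _ (by simp; omega)]

lemma dpInit_zero (n : Int) (l j : Nat) (hl : l ≠ 1) : aGet (dpInit n) l j = 0 := by
  rw [aGet, dpInit, getD_set_ne _ (fun h => hl h.symm)]
  rcases lt_or_ge l (n + 1).toNat with h | h
  · have hr : (List.replicate (n + 1).toNat (List.replicate 10 (0 : Int))).getD l []
        = List.replicate 10 0 := by
      rw [List.getD_eq_getElem _ _ (by simpa using h)]
      exact List.getElem_replicate _
    rw [hr, getD_rep]
  · have hr : (List.replicate (n + 1).toNat (List.replicate 10 (0 : Int))).getD l [] = [] :=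
      List.getD_eq_default _ _ (by simpa using h)
    rw [hr]
    rfl

def iterG (n : Int) (t : Nat) : List (List Int) :=
  (List.range' 2 t).foldl (fun dp i => (List.range' 1 9).foldl (fun dp j => jbody i dp j) dp) (dpInit n)

lemma iterG_succ (n : Int) (t : Nat) :
    iterG n (t + 1) = (List.range' 1 9).foldl (jbody (2 + t)) (iterG n t) := by
  unfold iterG
  have h : List.range' 2 (t + 1) = List.range' 2 t ++ [2 + t] := by
    rw [List.range'_concat (s := 2) (n := t)]
    norm_num
  rw [h, List.foldl_append, List.foldl_cons, List.foldl_nil]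

lemma rowNext_getD (r : List Int) (j : Nat) (hj1 : 1 ≤ j) (hj9 : j ≤ 9) :
    (rowNext r).getD j 0 =
      ((List.range' (max (j - 2) 1) (min (j + 2) 9 + 1 - max (j - 2) 1)).map
        (fun k => r.getD k 0)).sum % pvM := by
  interval_cases j <;> simp [rowNext, List.range']

lemma iloop (n : Int) (hn : 1 ≤ n) (t : Nat) (ht : t ≤ (n - 1).toNat) :
    (iterG n t).length = (n + 1).toNat ∧
    (∀ l, l < (iterG n t).length → (((iterG n t).getD l []).length) = 10) ∧
    (∀ j, j < 10 → aGet (iterG n t) (t + 1) j = (rowSpec t).getD j 0) ∧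
    (∀ l j, t + 1 < l → aGet (iterG n t) l j = 0) := by
  induction t with
  | zero =>
      refine ⟨dpInit_length n, dpInit_rowlen n, fun j _ => dpInit_row1 n hn j, ?_⟩
      intro l j hl
      exact dpInit_zero n l j (by omega)
  | succ t iht =>
      obtain ⟨q1, q2, q3, q4⟩ := iht (by omega)
      have hi : 2 + t < (iterG n t).length := by rw [q1]; omega
      obtain ⟨pa, pb, pc, pd, pe⟩ := jloop (List.range' 1 9) (iterG n t) (2 + t)
        (by omega) hi q2
        (by intro j hj; rw [List.mem_range'_1] at hj; omega)
        (by decide)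
        (fun j _ => q4 (2 + t) j (by omega))
      rw [iterG_succ]
      refine ⟨by rw [pd, q1], pe, ?_, ?_⟩
      · intro j hj10
        have ht2 : t + 1 + 1 = 2 + t := by omega
        rw [ht2]
        by_cases hjm : j ∈ List.range' 1 9
        · rw [pc j hjm]
          have hj19 : 1 ≤ j ∧ j < 10 := by rw [List.mem_range'_1] at hjm; omega
          have hmap : List.map (fun k => aGet (iterG n t) (2 + t - 1) k)
              (List.range' (max (j - 2) 1) (min (j + 2) 9 + 1 - max (j - 2) 1))
                = List.map (fun k => (rowSpec t).getD k 0)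
              (List.range' (max (j - 2) 1) (min (j + 2) 9 + 1 - max (j - 2) 1)) := by
            refine List.map_congr_left (fun k hk => ?_)
            rw [List.mem_range'_1] at hk
            have h21 : 2 + t - 1 = t + 1 := by omega
            rw [h21]
            exact q3 k (by omega)
          rw [hmap, show rowSpec (t + 1) = rowNext (rowSpec t) from rfl,
              rowNext_getD _ j hj19.1 (by omega)]
        · have hj0 : j = 0 := by
            rw [List.mem_range'_1] at hjm; omega
          subst hj0
          rw [pb 0 hjm, q4 (2 + t) 0 (by omega)]
          simp [rowSpec, rowNext]
      · intro l j hl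
        rw [pa l j (by omega)]
        exact q4 l j (by omega)

lemma foldl_add_eq (js : List Nat) (f : Nat → Int) (a : Int) :
    js.foldl (fun a j => a + f j) a = a + (js.map f).sum := by
  induction js generalizing a with
  | nil => simp
  | cons j js ih => simp [ih, add_assoc]

lemma solution_eq_rowSpec (n : Int) (hn : 1 ≤ n) :
    solution n = ((List.range' 1 9).map (fun j => (rowSpec (n - 1).toNat).getD j 0)).sum % pvM := by
  obtain ⟨q1, q2, q3, q4⟩ := iloop n hn (n - 1).toNat le_rfl
  have e1 : solution n =
      ((List.range' 1 9).foldl (fun a j => a + aGet (iterG n (n - 1).toNat) n.toNat j) 0) % pvM := by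
    simp only [solution]
    rw [dp1_eq n hn]
    simp only [iterG, jbody]
  rw [e1, foldl_add_eq, zero_add]
  have hm : (List.range' 1 9).map (aGet (iterG n (n - 1).toNat) n.toNat)
      = (List.range' 1 9).map (fun j => (rowSpec (n - 1).toNat).getD j 0) := by
    refine List.map_congr_left (fun j hj => ?_)
    rw [List.mem_range'_1] at hj
    have hN : n.toNat = (n - 1).toNat + 1 := by omega
    rw [hN]
    exact q3 j (by omega)
  rw [hm]

-- ---- bridge to ZMod matrices ----
def w (t : Nat) (j : Fin 9) : ZMod MOD := (((rowSpec t).getD ((j : Nat) + 1) 0 : Int) : ZMod MOD)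

lemma w_zero (j : Fin 9) : w 0 j = 1 := by
  fin_cases j <;> simp [w, rowSpec]

lemma w_succ (t : Nat) (j : Fin 9) :
    w (t + 1) j = ∑ k, φ bT j k * w t k := by
  have hr : rowSpec (t + 1) = rowNext (rowSpec t) := rfl
  fin_cases j <;>
    · simp [w, hr, rowNext, List.range', φ, bT_entry, Fin.sum_univ_succ, castM]
      try norm_num
      try push_cast
      try ring

lemma w_pow (t : Nat) (j : Fin 9) : w t j = ∑ k, (((φ bT) ^ t) j k) := by
  induction t generalizing j with
  | zero => simp [w_zero, Matrix.one_apply]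
  | succ t ih =>
      rw [w_succ]
      have hterm : ∀ k : Fin 9, φ bT j k * w t k = ∑ m, φ bT j k * ((φ bT) ^ t) k m := by
        intro k
        rw [ih k, Finset.mul_sum]
      rw [Finset.sum_congr rfl (fun k _ => hterm k), Finset.sum_comm]
      refine Finset.sum_congr rfl (fun m _ => ?_)
      rw [pow_succ', Matrix.mul_apply]

lemma sum_rowSpec_cast (e : Nat) :
    ((((List.range' 1 9).map (fun j => (rowSpec e).getD j 0)).sum : Int) : ZMod MOD)
      = ∑ j, w e j := by
  simp [List.range', w, Fin.sum_univ_succ]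
  try push_cast
  try ring

-- ===== VERDICT (by name: the statement is the Claim_ definition above) =====
theorem solution_spec : Claim_equal_solution := by
  unfold Claim_equal_solution Spec_solution Pre_solution
  intro n _ hn
  rw [solution_eq_rowSpec n hn]
  have h2 : solution_alt n
      = ((bPow bId bT (n - 1).toNat).map (fun row => row.sum)).sum % pvM := rfl
  rw [h2]
  apply mod_eq_of_cast_eq
  rw [sum_rowSpec_cast, Finset.sum_congr rfl (fun j _ => w_pow (n - 1).toNat j),
      alt_cast _ (shape_bPow bId bT shape_bId _)]
  have hφ : φ (bPow bId bT (n - 1).toNat) = (φ bT) ^ (n - 1).toNat := by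
    rw [φ_bPow, φ_id, one_mul]
  have h3 : ∀ i j : Fin 9,
      ((aGet (bPow bId bT (n - 1).toNat) i j : Int) : ZMod MOD) = ((φ bT) ^ (n - 1).toNat) i j := by
    intro i j
    rw [← hφ]
    rfl
  rw [Finset.sum_congr rfl (fun i _ => Finset.sum_congr rfl (fun j _ => h3 i j))]
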